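-- pv_equiv track=rewrite | github.com/ishandutta2007/codeforces | somethingnew/normal/1531/E2.py | unsort
-- ===== SOURCE A (Python) =====
-- def unsort(n, log):
--     ind = [0, 1]
--     a = [i + 1 for i in range(n)]
--     b = [0 for i in range(n)]
--     def mergeSort(l, r):
--         if r - l <= 1:
--             return
--         m = (l + r) >> 1
--         mergeSort(l, m)
--         mergeSort(m, r)
--         i, j, k = l, m, l
--         while i < m and j < r:
--             if ind[0] == len(log):
--                 ind[1] = -1
--                 return
--             if log[ind[0]] == '0':
--                 ind[0] += 1
--                 b[k] = a[i]
--                 i += 1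
--             else:
--                 ind[0] += 1
--                 b[k] = a[j]
--                 j += 1
--             k += 1
--         while i < m:
--             b[k] = a[i]
--             i += 1
--             k += 1
--         while j < r:
--             b[k] = a[j]
--             j += 1
--             k += 1
--         for p in range(l, r):
--             a[p] = b[p]
--     mergeSort(0, n)
--     if ind[0] == len(log) and ind[1] == 1:
--         return a
--     return [-1]
-- ===== SOURCE B (Python) =====
-- def unsort(n, log):
--     # Same merge decisions replayed with an explicit stack (post-order) instead of
--     # recursion, and one three-way-branch loop per merge instead of three while loops.
--     a = list(range(1, n + 1))
--     b = [0] * n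
--     cur = 0
--     stack = [("call", 0, n, 0)]
--     while stack:
--         kind, l, r, m = stack.pop()
--         if kind == "call":
--             if r - l > 1:
--                 m = (l + r) >> 1
--                 stack.append(("merge", l, r, m))
--                 stack.append(("call", m, r, 0))
--                 stack.append(("call", l, m, 0))
--         else:
--             i, j = l, m
--             for k in range(l, r):
--                 if i < m and j < r:
--                     if cur == len(log):
--                         return [-1]
--                     if log[cur] == '0':
--                         b[k] = a[i]
--                         i += 1
--                     else:
--                         b[k] = a[j]
--                         j += 1
--                     cur += 1
--                 elif i < m:
--                     b[k] = a[i]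
--                     i += 1
--                 else:
--                     b[k] = a[j]
--                     j += 1
--             a[l:r] = b[l:r]
--     return a if cur == len(log) else [-1]
-- ===== Notes on version B (the rewrite author's own statement) =====
-- stated objective: alternative
-- what changed: Replaces the recursive mergeSort that mutates closure state with an explicit-stack post-order machine (call/merge frames) whose merge is a single three-way-branch loop with slice-assignment copy-back and an immediate return [-1] on log exhaustion, instead of A's three while-loops plus element-wise copy and failure flag threaded back up the recursion.
import Mathlib
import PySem

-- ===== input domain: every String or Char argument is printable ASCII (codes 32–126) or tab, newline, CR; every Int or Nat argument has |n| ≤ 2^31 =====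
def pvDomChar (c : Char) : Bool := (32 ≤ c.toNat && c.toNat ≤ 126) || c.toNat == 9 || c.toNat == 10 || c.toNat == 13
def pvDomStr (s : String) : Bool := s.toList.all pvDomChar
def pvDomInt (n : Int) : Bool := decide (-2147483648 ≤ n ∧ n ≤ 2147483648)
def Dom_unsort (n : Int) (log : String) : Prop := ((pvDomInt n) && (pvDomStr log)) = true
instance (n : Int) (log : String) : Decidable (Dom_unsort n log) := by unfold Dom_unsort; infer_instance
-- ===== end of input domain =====

-- B rewrites A's recursive merge sort as an explicit-stack post-order machine with a single
-- three-way-branch merge loop (objective: alternative decomposition, same cost).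

-- Python's (l+r)>>1 on ints is floor((l+r)/2); this midpoint lemma is cited by both
-- ports' termination proofs.
theorem pvMidBounds (l r : Int) (h : 1 < r - l) :
    l < PySem.Int.floordiv (l + r) 2 ∧ PySem.Int.floordiv (l + r) 2 < r := by
  have h1 := PySem.Int.floordiv_mul_add_mod (l + r) 2
  have h2 := PySem.Int.mod_nonneg (l + r) (b := 2) (by omega)
  have h3 := PySem.Int.mod_lt (l + r) (b := 2) (by omega)
  omega

-- cited by runB's termination proof
theorem pvPow3 (a b : Nat) (ha : 1 ≤ a) (hb : 1 ≤ b) : 3 ^ a + 3 ^ b + 1 < 3 ^ (a + b) := by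
  have h1 : 3 ^ 1 ≤ 3 ^ a := Nat.pow_le_pow_right (by norm_num) ha
  have h2 : 3 ^ 1 ≤ 3 ^ b := Nat.pow_le_pow_right (by norm_num) hb
  have h3 : 3 ^ (a + b) = 3 ^ a * 3 ^ b := pow_add 3 a b
  nlinarith

-- ===== PORT A =====
-- mutable state of A: ind[0] (log cursor), ind[1] (as a Bool: true = 1, false = -1), a, b
structure UState where
  cur : Nat
  ok : Bool
  a : List Int
  b : List Int
  deriving Repr, DecidableEq

-- a[i] / b[k] = v: in this program every executed index is in range, where pyGetD/pySetD are exact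
def aGet (xs : List Int) (i : Int) : Int := PySem.List.pyGetD xs i 0
def aSet (xs : List Int) (i : Int) (v : Int) : List Int := PySem.List.pySetD xs i v

-- 'while i < m and j < r: …' (the log-consuming loop; Bool result = early 'return' taken)
def loop1A (logL : List Char) (m r i j k : Int) (s : UState) :
    Int × Int × Int × UState × Bool :=
  if h : i < m ∧ j < r then
    if s.cur = logL.length then (i, j, k, { s with ok := false }, true)
    else if logL.getD s.cur ' ' = '0' then
      loop1A logL m r (i + 1) j (k + 1)
        { s with cur := s.cur + 1, b := aSet s.b k (aGet s.a i) }
    else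
      loop1A logL m r i (j + 1) (k + 1)
        { s with cur := s.cur + 1, b := aSet s.b k (aGet s.a j) }
  else (i, j, k, s, false)
termination_by (m - i).toNat + (r - j).toNat
decreasing_by all_goals omega

-- 'while i < m: …'
def tailIA (m i k : Int) (s : UState) : Int × UState :=
  if h : i < m then tailIA m (i + 1) (k + 1) { s with b := aSet s.b k (aGet s.a i) }
  else (k, s)
termination_by (m - i).toNat
decreasing_by omega

-- 'while j < r: …'
def tailJA (r j k : Int) (s : UState) : Int × UState :=
  if h : j < r then tailJA r (j + 1) (k + 1) { s with b := aSet s.b k (aGet s.a j) }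
  else (k, s)
termination_by (r - j).toNat
decreasing_by omega

-- 'for p in range(l, r): a[p] = b[p]'
def copyA (l r : Int) (s : UState) : UState :=
  (PySem.List.pyRange l r 1).foldl (fun t p => { t with a := aSet t.a p (aGet t.b p) }) s

-- the merge part of mergeSort after the two recursive calls (Bool = early 'return' taken)
def mergeStepA (logL : List Char) (l m r : Int) (s : UState) : UState × Bool :=
  match loop1A logL m r l m l s with
  | (i, j, k, s3, aborted) =>
    if aborted then (s3, true)
    else
      let (k2, s4) := tailIA m i k s3
      let (_, s5) := tailJA r j k2 s4
      (copyA l r s5, false)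

def msA (logL : List Char) (l r : Int) (s : UState) : UState :=
  if r - l ≤ 1 then s
  else
    let m := PySem.Int.floordiv (l + r) 2
    let s1 := msA logL l m s
    let s2 := msA logL m r s1
    (mergeStepA logL l m r s2).1
termination_by (r - l).toNat
decreasing_by
  · have := pvMidBounds l r (by omega); omega
  · have := pvMidBounds l r (by omega); omega

def unsort (n : Int) (log : String) : List Int :=
  let logL := log.toList
  let a0 := (PySem.List.pyRange 0 n 1).map (fun i => i + 1)
  let b0 := (PySem.List.pyRange 0 n 1).map (fun _ => (0 : Int))
  let s := msA logL 0 n ⟨0, true, a0, b0⟩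
  if s.cur = logL.length ∧ s.ok = true then s.a else [-1]

-- ===== PORT B =====
inductive BFrame where
  | call (l r : Int)
  | merge (l r m : Int)
  deriving Repr, DecidableEq

def BFrame.wt : BFrame → Nat
  | .call l r => 3 ^ (r - l).toNat
  | .merge _ _ _ => 1

def stackWt (fs : List BFrame) : Nat := (fs.map BFrame.wt).sum

-- 'for k in range(l, r): …' of B's merge; none = the early 'return [-1]'
def mergeB (logL : List Char) (m r i j k : Int) (cur : Nat) (a b : List Int) :
    Option (Nat × List Int) :=
  if hk : k < r then
    if i < m ∧ j < r then
      if cur = logL.length then none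
      else if logL.getD cur ' ' = '0' then
        mergeB logL m r (i + 1) j (k + 1) (cur + 1) a (aSet b k (aGet a i))
      else
        mergeB logL m r i (j + 1) (k + 1) (cur + 1) a (aSet b k (aGet a j))
    else if i < m then mergeB logL m r (i + 1) j (k + 1) cur a (aSet b k (aGet a i))
    else mergeB logL m r i (j + 1) (k + 1) cur a (aSet b k (aGet a j))
  else some (cur, b)
termination_by (r - k).toNat
decreasing_by all_goals omega

-- 'while stack: …'; a[l:r] = b[l:r] is exact as take/slice/drop since 0 ≤ l ≤ r ≤ len(a) holds
-- for every frame the machine reaches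
def runB (logL : List Char) (fs : List BFrame) (cur : Nat) (a b : List Int) :
    Option (Nat × List Int) :=
  match fs with
  | [] => some (cur, a)
  | .call l r :: rest =>
    if 1 < r - l then
      let m := PySem.Int.floordiv (l + r) 2
      runB logL (.call l m :: .call m r :: .merge l r m :: rest) cur a b
    else runB logL rest cur a b
  | .merge l r m :: rest =>
    match mergeB logL m r l m l cur a b with
    | none => none
    | some (cur', b') =>
      runB logL rest cur'
        (a.take l.toNat ++ PySem.List.slice b' (some l) (some r) ++ a.drop r.toNat) b'
termination_by stackWt fs
decreasing_by
  · obtain ⟨h1, h2⟩ := pvMidBounds l r (by omega)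
    simp only [stackWt, List.map_cons, List.sum_cons, BFrame.wt]
    have he : (PySem.Int.floordiv (l + r) 2 - l).toNat + (r - PySem.Int.floordiv (l + r) 2).toNat
        = (r - l).toNat := by omega
    have hp := pvPow3 (PySem.Int.floordiv (l + r) 2 - l).toNat
      (r - PySem.Int.floordiv (l + r) 2).toNat (by omega) (by omega)
    rw [he] at hp
    omega
  · simp only [stackWt, List.map_cons, List.sum_cons, BFrame.wt]
    have : 0 < 3 ^ (r - l).toNat := Nat.pow_pos (by norm_num)
    omega
  · simp only [stackWt, List.map_cons, List.sum_cons, BFrame.wt]; omega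

def unsort_alt (n : Int) (log : String) : List Int :=
  let logL := log.toList
  let a0 := PySem.List.pyRange 1 (n + 1) 1
  let b0 := List.replicate n.toNat (0 : Int)
  match runB logL [.call 0 n] 0 a0 b0 with
  | none => [-1]
  | some (cur, a) => if cur = logL.length then a else [-1]

-- ===== PRECONDITION & SPEC =====
def Spec_unsort (n : Int) (log : String) (out : List Int) : Prop := out = unsort_alt n log
instance (n : Int) (log : String) (out : List Int) : Decidable (Spec_unsort n log out) := by
  unfold Spec_unsort; infer_instance

-- ===== CLAIM (what is proved, stated in full; the proofs are below) =====
def Claim_equal_unsort : Prop := ∀ (n : Int) (log : String), Dom_unsort n log → Spec_unsort n log (unsort n log)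


-- ===== LEMMAS AND PROOFS =====

-- structure eta: rewriting ok to its own value is the identity
theorem ustate_eta_ok (s : UState) (h : s.ok = false) : { s with ok := false } = s := by
  cases s; simp_all

-- one-step equations for loop1A
theorem loop1A_abort (logL : List Char) (m r i j k : Int) (s : UState)
    (hc : i < m ∧ j < r) (hcur : s.cur = logL.length) :
    loop1A logL m r i j k s = (i, j, k, { s with ok := false }, true) := by
  rw [loop1A, dif_pos hc, if_pos hcur]

theorem loop1A_step0 (logL : List Char) (m r i j k : Int) (s : UState)
    (hc : i < m ∧ j < r) (hcur : ¬ s.cur = logL.length) (hch : logL.getD s.cur ' ' = '0') :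
    loop1A logL m r i j k s =
      loop1A logL m r (i + 1) j (k + 1) { s with cur := s.cur + 1, b := aSet s.b k (aGet s.a i) } := by
  rw [loop1A, dif_pos hc, if_neg hcur, if_pos hch]

theorem loop1A_step1 (logL : List Char) (m r i j k : Int) (s : UState)
    (hc : i < m ∧ j < r) (hcur : ¬ s.cur = logL.length) (hch : ¬ logL.getD s.cur ' ' = '0') :
    loop1A logL m r i j k s =
      loop1A logL m r i (j + 1) (k + 1) { s with cur := s.cur + 1, b := aSet s.b k (aGet s.a j) } := by
  rw [loop1A, dif_pos hc, if_neg hcur, if_neg hch]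

theorem loop1A_exit (logL : List Char) (m r i j k : Int) (s : UState)
    (hc : ¬ (i < m ∧ j < r)) : loop1A logL m r i j k s = (i, j, k, s, false) := by
  rw [loop1A, dif_neg hc]

-- invariants of loop1A (a unchanged, b-length kept, abort flag semantics)
theorem loop1A_inv (logL : List Char) (m r i j k : Int) (s : UState) :
    (loop1A logL m r i j k s).2.2.2.1.a = s.a ∧
    (loop1A logL m r i j k s).2.2.2.1.b.length = s.b.length ∧
    ((loop1A logL m r i j k s).2.2.2.2 = true →
      (loop1A logL m r i j k s).2.2.2.1.cur = logL.length ∧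
      (loop1A logL m r i j k s).2.2.2.1.ok = false) ∧
    ((loop1A logL m r i j k s).2.2.2.2 = false →
      (loop1A logL m r i j k s).2.2.2.1.ok = s.ok) := by
  fun_induction loop1A logL m r i j k s with
  | case1 i j k s hc hcur => simp_all
  | case2 i j k s hc hcur hch ih => simpa [PySem.List.length_pySetD, aSet] using ih
  | case3 i j k s hc hcur hch ih => simpa [PySem.List.length_pySetD, aSet] using ih
  | case4 i j k s hc => simp_all

theorem tailIA_inv (m i k : Int) (s : UState) :
    (tailIA m i k s).2.a = s.a ∧ (tailIA m i k s).2.b.length = s.b.length ∧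
    (tailIA m i k s).2.cur = s.cur ∧ (tailIA m i k s).2.ok = s.ok := by
  fun_induction tailIA m i k s with
  | case1 i k s hi ih => simpa [PySem.List.length_pySetD, aSet] using ih
  | case2 i k s hi => simp

theorem tailJA_inv (r j k : Int) (s : UState) :
    (tailJA r j k s).2.a = s.a ∧ (tailJA r j k s).2.b.length = s.b.length ∧
    (tailJA r j k s).2.cur = s.cur ∧ (tailJA r j k s).2.ok = s.ok := by
  fun_induction tailJA r j k s with
  | case1 j k s hj ih => simpa [PySem.List.length_pySetD, aSet] using ih
  | case2 j k s hj => simp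

-- copyA only rewrites a, preserving its length
theorem copyA_fields (l r : Int) (s : UState) :
    (copyA l r s).cur = s.cur ∧ (copyA l r s).ok = s.ok ∧ (copyA l r s).b = s.b ∧
    (copyA l r s).a.length = s.a.length := by
  unfold copyA
  generalize (PySem.List.pyRange l r 1) = ps
  induction ps generalizing s with
  | nil => simp
  | cons p ps ih =>
    simp only [List.foldl_cons]
    have := ih { s with a := aSet s.a p (aGet s.b p) }
    simpa [PySem.List.length_pySetD, aSet] using this

-- the merge phase of A without the final copy-back (proof helper)
def phaseH (logL : List Char) (m r i j k : Int) (s : UState) : UState × Bool :=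
  match loop1A logL m r i j k s with
  | (i', j', k', s', ab) =>
    if ab then (s', true)
    else
      let (k2, s4) := tailIA m i' k' s'
      let (_, s5) := tailJA r j' k2 s4
      (s5, false)

theorem mergeStepA_eq_phaseH (logL : List Char) (l m r : Int) (s : UState) :
    mergeStepA logL l m r s =
      (if (phaseH logL m r l m l s).2 then phaseH logL m r l m l s
       else (copyA l r (phaseH logL m r l m l s).1, false)) := by
  unfold mergeStepA phaseH
  rcases h : loop1A logL m r l m l s with ⟨i, j, k, s3, ab⟩
  cases ab <;> simp

theorem mergeStepA_abort (logL : List Char) (l m r : Int) (s : UState)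
    (hc : l < m ∧ m < r) (hcur : s.cur = logL.length) (hok : s.ok = false) :
    mergeStepA logL l m r s = (s, true) := by
  unfold mergeStepA
  rw [loop1A_abort logL m r l m l s hc hcur]
  dsimp only
  rw [ustate_eta_ok s hok, if_pos rfl]

-- phaseH only depends on loop1A's output
theorem phaseH_congr (logL : List Char) (m r i j k i' j' k' : Int) (s s' : UState)
    (h : loop1A logL m r i j k s = loop1A logL m r i' j' k' s') :
    phaseH logL m r i j k s = phaseH logL m r i' j' k' s' := by
  unfold phaseH; rw [h]

-- tail-copy steps of phaseH (used when only one side is non-exhausted)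
theorem phaseH_left (logL : List Char) (m r i j k : Int) (s : UState)
    (hi : i < m) (hj : ¬ j < r) :
    phaseH logL m r i j k s =
      phaseH logL m r (i + 1) j (k + 1) { s with b := aSet s.b k (aGet s.a i) } := by
  unfold phaseH
  rw [loop1A_exit logL m r i j k s (by tauto),
    loop1A_exit logL m r (i + 1) j (k + 1) _ (by tauto)]
  simp only [if_neg (by simp : ¬ false = true)]
  conv_lhs => rw [tailIA, dif_pos hi]

theorem phaseH_right (logL : List Char) (m r i j k : Int) (s : UState)
    (hi : ¬ i < m) (hj : j < r) :
    phaseH logL m r i j k s =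
      phaseH logL m r i (j + 1) (k + 1) { s with b := aSet s.b k (aGet s.a j) } := by
  unfold phaseH
  rw [loop1A_exit logL m r i j k s (by tauto),
    loop1A_exit logL m r i (j + 1) (k + 1) _ (by tauto)]
  simp only
  rw [tailIA, dif_neg hi, tailIA, dif_neg hi]
  simp only [if_neg (by simp : ¬ false = true)]
  conv_lhs => rw [tailJA, dif_pos hj]

-- B's single merge loop computes exactly A's three-loop merge phase
theorem phase_eq (logL : List Char) (m r : Int) :
    ∀ (K : Nat) (i j k : Int) (s : UState), (r - k).toNat ≤ K → i ≤ m → j ≤ r →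
      m - i + (r - j) = r - k → s.ok = true →
      (match mergeB logL m r i j k s.cur s.a s.b with
       | none => (phaseH logL m r i j k s).2 = true ∧ (phaseH logL m r i j k s).1.ok = false
       | some (cur', b') =>
           phaseH logL m r i j k s = ({ s with cur := cur', b := b' }, false) ∧
           b'.length = s.b.length) := by
  have base : ∀ (i j k : Int) (s : UState), i ≤ m → j ≤ r → m - i + (r - j) = r - k →
      ¬ k < r →
      (match mergeB logL m r i j k s.cur s.a s.b with
       | none => (phaseH logL m r i j k s).2 = true ∧ (phaseH logL m r i j k s).1.ok = false
       | some (cur', b') =>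
           phaseH logL m r i j k s = ({ s with cur := cur', b := b' }, false) ∧
           b'.length = s.b.length) := by
    intro i j k s hi hj hinv hk
    have him : i = m := by omega
    have hjr : j = r := by omega
    rw [mergeB, dif_neg hk]
    simp only
    constructor
    · unfold phaseH
      rw [loop1A_exit logL m r i j k s (by omega)]
      simp only
      rw [tailIA, dif_neg (by omega : ¬ i < m), tailJA, dif_neg (by omega : ¬ j < r)]
      simp
    · trivial
  intro K
  induction K with
  | zero =>
    intro i j k s hK hi hj hinv _hok
    exact base i j k s hi hj hinv (by omega)
  | succ K ih =>
    intro i j k s hK hi hj hinv hok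
    by_cases hk : k < r
    · by_cases hc : i < m ∧ j < r
      · by_cases hcur : s.cur = logL.length
        · rw [mergeB, dif_pos hk, if_pos hc, if_pos hcur]
          simp only
          unfold phaseH
          rw [loop1A_abort logL m r i j k s hc hcur]
          simp
        · by_cases hch : logL.getD s.cur ' ' = '0'
          · have hrec : mergeB logL m r i j k s.cur s.a s.b =
                mergeB logL m r (i + 1) j (k + 1) (s.cur + 1) s.a (aSet s.b k (aGet s.a i)) := by
              rw [mergeB, dif_pos hk, if_pos hc, if_neg hcur, if_pos hch]
            have hph := phaseH_congr logL m r i j k (i + 1) j (k + 1) s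
              { s with cur := s.cur + 1, b := aSet s.b k (aGet s.a i) }
              (loop1A_step0 logL m r i j k s hc hcur hch)
            have hlen : (aSet s.b k (aGet s.a i)).length = s.b.length := by
              simp [aSet, PySem.List.length_pySetD]
            have ihx := ih (i + 1) j (k + 1)
              { s with cur := s.cur + 1, b := aSet s.b k (aGet s.a i) }
              (by omega) (by omega) hj (by omega) hok
            rw [hrec, hph]
            rcases hmb : mergeB logL m r (i + 1) j (k + 1) (s.cur + 1) s.a
                (aSet s.b k (aGet s.a i)) with _ | ⟨cur', b'⟩ <;>
              rw [hmb] at ihx <;> simp only at ihx ⊢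
            · exact ihx
            · exact ⟨ihx.1, by simpa [hlen] using ihx.2⟩
          · have hrec : mergeB logL m r i j k s.cur s.a s.b =
                mergeB logL m r i (j + 1) (k + 1) (s.cur + 1) s.a (aSet s.b k (aGet s.a j)) := by
              rw [mergeB, dif_pos hk, if_pos hc, if_neg hcur, if_neg hch]
            have hph := phaseH_congr logL m r i j k i (j + 1) (k + 1) s
              { s with cur := s.cur + 1, b := aSet s.b k (aGet s.a j) }
              (loop1A_step1 logL m r i j k s hc hcur hch)
            have hlen : (aSet s.b k (aGet s.a j)).length = s.b.length := by
              simp [aSet, PySem.List.length_pySetD]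
            have ihx := ih i (j + 1) (k + 1)
              { s with cur := s.cur + 1, b := aSet s.b k (aGet s.a j) }
              (by omega) hi (by omega) (by omega) hok
            rw [hrec, hph]
            rcases hmb : mergeB logL m r i (j + 1) (k + 1) (s.cur + 1) s.a
                (aSet s.b k (aGet s.a j)) with _ | ⟨cur', b'⟩ <;>
              rw [hmb] at ihx <;> simp only at ihx ⊢
            · exact ihx
            · exact ⟨ihx.1, by simpa [hlen] using ihx.2⟩
      · by_cases hi2 : i < m
        · have hjr : ¬ j < r := by tauto
          have hrec : mergeB logL m r i j k s.cur s.a s.b =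
              mergeB logL m r (i + 1) j (k + 1) s.cur s.a (aSet s.b k (aGet s.a i)) := by
            rw [mergeB, dif_pos hk, if_neg hc, if_pos hi2]
          have hph := phaseH_left logL m r i j k s hi2 hjr
          have hlen : (aSet s.b k (aGet s.a i)).length = s.b.length := by
            simp [aSet, PySem.List.length_pySetD]
          have ihx := ih (i + 1) j (k + 1) { s with b := aSet s.b k (aGet s.a i) }
            (by omega) (by omega) hj (by omega) hok
          rw [hrec, hph]
          rcases hmb : mergeB logL m r (i + 1) j (k + 1) s.cur s.a
              (aSet s.b k (aGet s.a i)) with _ | ⟨cur', b'⟩ <;>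
            rw [hmb] at ihx <;> simp only at ihx ⊢
          · exact ihx
          · exact ⟨ihx.1, by simpa [hlen] using ihx.2⟩
        · have hjr : j < r := by omega
          have hrec : mergeB logL m r i j k s.cur s.a s.b =
              mergeB logL m r i (j + 1) (k + 1) s.cur s.a (aSet s.b k (aGet s.a j)) := by
            rw [mergeB, dif_pos hk, if_neg hc, if_neg hi2]
          have hph := phaseH_right logL m r i j k s hi2 hjr
          have hlen : (aSet s.b k (aGet s.a j)).length = s.b.length := by
            simp [aSet, PySem.List.length_pySetD]
          have ihx := ih i (j + 1) (k + 1) { s with b := aSet s.b k (aGet s.a j) }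
            (by omega) hi (by omega) (by omega) hok
          rw [hrec, hph]
          rcases hmb : mergeB logL m r i (j + 1) (k + 1) s.cur s.a
              (aSet s.b k (aGet s.a j)) with _ | ⟨cur', b'⟩ <;>
            rw [hmb] at ihx <;> simp only at ihx ⊢
          · exact ihx
          · exact ⟨ihx.1, by simpa [hlen] using ihx.2⟩
    · exact base i j k s hi hj hinv hk

-- 'if A ran out of log (ok = false, cursor at the end), every later mergeSort call is a no-op'
theorem msA_noop (logL : List Char) : ∀ (N : Nat) (l r : Int), (r - l).toNat ≤ N →
    ∀ s : UState, s.cur = logL.length → s.ok = false → msA logL l r s = s := by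
  intro N
  induction N with
  | zero =>
    intro l r hN s hcur hok
    rw [msA, if_pos (by omega)]
  | succ N ih =>
    intro l r hN s hcur hok
    by_cases hbase : r - l ≤ 1
    · rw [msA, if_pos hbase]
    · rw [msA, if_neg hbase]
      have hm := pvMidBounds l r (by omega)
      dsimp only
      rw [ih l _ (by omega) s hcur hok, ih _ r (by omega) s hcur hok]
      unfold mergeStepA
      rw [loop1A_abort logL _ r l _ l s ⟨hm.1, hm.2⟩ hcur]
      simp [ustate_eta_ok s hok]

theorem mergeStepA_inv (logL : List Char) (l m r : Int) (s : UState) :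
    (mergeStepA logL l m r s).1.a.length = s.a.length ∧
    (mergeStepA logL l m r s).1.b.length = s.b.length ∧
    ((mergeStepA logL l m r s).2 = true →
      (mergeStepA logL l m r s).1.cur = logL.length ∧ (mergeStepA logL l m r s).1.ok = false) ∧
    ((mergeStepA logL l m r s).2 = false → (mergeStepA logL l m r s).1.ok = s.ok) := by
  unfold mergeStepA
  have l1 := loop1A_inv logL m r l m l s
  rcases h : loop1A logL m r l m l s with ⟨i, j, k, s3, ab⟩
  rw [h] at l1
  simp only at l1
  cases ab with
  | true => simpa using ⟨by rw [l1.1], l1.2.1, l1.2.2.1 rfl⟩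
  | false =>
    have t1 := tailIA_inv m i k s3
    rcases h4 : tailIA m i k s3 with ⟨k2, s4⟩
    rw [h4] at t1; simp only at t1
    have t2 := tailJA_inv r j k2 s4
    rcases h5 : tailJA r j k2 s4 with ⟨k3, s5⟩
    rw [h5] at t2; simp only at t2
    have c := copyA_fields l r s5
    dsimp only
    rw [h4]
    dsimp only
    rw [h5]
    dsimp only
    simp only [Bool.false_eq_true, if_false]
    refine ⟨?_, ?_, by simp, ?_⟩
    · rw [c.2.2.2, t2.1, t1.1, l1.1]
    · rw [show (copyA l r s5).b = s5.b from c.2.2.1, t2.2.1, t1.2.1, l1.2.1]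
    · intro _
      rw [c.2.1, t2.2.2.2, t1.2.2.2, l1.2.2.2 rfl]

-- msA preserves lengths; failure implies the cursor sits at the end of the log
theorem msA_inv (logL : List Char) : ∀ (N : Nat) (l r : Int), (r - l).toNat ≤ N →
    ∀ s : UState, s.ok = true →
      (msA logL l r s).a.length = s.a.length ∧
      (msA logL l r s).b.length = s.b.length ∧
      ((msA logL l r s).ok = false → (msA logL l r s).cur = logL.length) := by
  intro N
  induction N with
  | zero =>
    intro l r hN s hok
    rw [msA, if_pos (by omega)]
    simp [hok]
  | succ N ih =>
    intro l r hN s hok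
    by_cases hbase : r - l ≤ 1
    · rw [msA, if_pos hbase]; simp [hok]
    · rw [msA, if_neg hbase]
      have hm := pvMidBounds l r (by omega)
      dsimp only
      have inv1 := ih l (PySem.Int.floordiv (l + r) 2) (by omega) s hok
      by_cases h1 : (msA logL l (PySem.Int.floordiv (l + r) 2) s).ok = true
      · have inv2 := ih (PySem.Int.floordiv (l + r) 2) r (by omega) _ h1
        by_cases h2 : (msA logL (PySem.Int.floordiv (l + r) 2) r
            (msA logL l (PySem.Int.floordiv (l + r) 2) s)).ok = true
        · have si := mergeStepA_inv logL l (PySem.Int.floordiv (l + r) 2) r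
            (msA logL (PySem.Int.floordiv (l + r) 2) r
              (msA logL l (PySem.Int.floordiv (l + r) 2) s))
          refine ⟨by omega, by omega, ?_⟩
          intro hokf
          rcases hab : (mergeStepA logL l (PySem.Int.floordiv (l + r) 2) r
              (msA logL (PySem.Int.floordiv (l + r) 2) r
                (msA logL l (PySem.Int.floordiv (l + r) 2) s))).2 with _ | _
          · rw [si.2.2.2 hab, h2] at hokf; exact absurd hokf (by simp)
          · exact (si.2.2.1 hab).1
        · have hcur2 := inv2.2.2 (by simpa using h2)
          unfold mergeStepA
          rw [loop1A_abort logL _ r l _ l _ ⟨hm.1, hm.2⟩ hcur2]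
          dsimp only
          rw [ustate_eta_ok _ (by simpa using h2)]
          simp only [reduceIte]
          exact ⟨by omega, by omega, fun _ => hcur2⟩
      · have hcur1 := inv1.2.2 (by simpa using h1)
        rw [msA_noop logL ((r - PySem.Int.floordiv (l + r) 2).toNat) _ r le_rfl _ hcur1
          (by simpa using h1)]
        unfold mergeStepA
        rw [loop1A_abort logL _ r l _ l _ ⟨hm.1, hm.2⟩ hcur1]
        dsimp only
        rw [ustate_eta_ok _ (by simpa using h1)]
        simp only [reduceIte]
        exact ⟨by omega, by omega, fun _ => hcur1⟩

-- A's element-wise copy-back a[l:r] := b[l:r] as B's splice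
theorem copyA_splice : ∀ (N : Nat) (l r : Int) (s : UState), (r - l).toNat ≤ N →
    0 ≤ l → l ≤ r → r ≤ (s.a.length : Int) → s.b.length = s.a.length →
    (copyA l r s).a =
      s.a.take l.toNat ++ PySem.List.slice s.b (some l) (some r) ++ s.a.drop r.toNat := by
  intro N
  induction N with
  | zero =>
    intro l r s hN h0 hlr hr hb
    have hrl : r = l := by omega
    subst hrl
    unfold copyA
    rw [PySem.List.pyRange_one_eq_nil le_rfl]
    rw [PySem.List.slice_toNat s.b h0 h0]
    simp [List.take_append_drop]
  | succ N ih =>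
    intro l r s hN h0 hlr hr hb
    by_cases hlr2 : l < r
    · have hlenA : l.toNat < s.a.length := by omega
      have hlenB : l.toNat < s.b.length := by omega
      have hget : aGet s.b l = s.b[l.toNat] :=
        PySem.List.pyGetD_eq_getElem s.b 0 h0 (by omega)
      have hset : aSet s.a l (aGet s.b l) = s.a.set l.toNat s.b[l.toNat] := by
        rw [hget]; exact PySem.List.pySetD_of_nonneg s.a _ h0
      unfold copyA
      rw [PySem.List.pyRange_one_cons hlr2]
      simp only [List.foldl_cons]
      have hrec := ih (l + 1) r { s with a := aSet s.a l (aGet s.b l) }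
        (by omega) (by omega) (by omega)
        (by simp only [hset]; simpa [List.length_set] using hr)
        (by simpa [hset, List.length_set] using hb)
      unfold copyA at hrec
      simp only at hrec
      rw [hrec, hset]
      have ht1 : (l + 1).toNat = l.toNat + 1 := by omega
      have htake : (s.a.set l.toNat s.b[l.toNat]).take (l.toNat + 1)
          = s.a.take l.toNat ++ [s.b[l.toNat]] := by
        rw [List.set_eq_take_cons_drop _ hlenA, List.take_append]
        simp [List.length_take, Nat.min_eq_left (Nat.le_of_lt hlenA), List.take_of_length_le]
      have hdrop : (s.a.set l.toNat s.b[l.toNat]).drop r.toNat = s.a.drop r.toNat :=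
        List.drop_set_of_lt (by omega)
      have hslice : PySem.List.slice s.b (some l) (some r)
          = s.b[l.toNat] :: PySem.List.slice s.b (some (l + 1)) (some r) := by
        rw [PySem.List.slice_toNat s.b h0 (by omega),
          PySem.List.slice_toNat s.b (by omega) (by omega), ht1]
        rw [show r.toNat - l.toNat = (r.toNat - (l.toNat + 1)) + 1 by omega]
        rw [List.drop_eq_getElem_cons hlenB, List.take_succ_cons]
      rw [ht1, htake, hdrop, hslice]
      simp [List.append_assoc]
    · have hrl : r = l := by omega
      subst hrl
      unfold copyA
      rw [PySem.List.pyRange_one_eq_nil le_rfl]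
      rw [PySem.List.slice_toNat s.b h0 h0]
      simp [List.take_append_drop]

-- main simulation: one 'call' frame of B's machine behaves as one recursive call of A
theorem simL (logL : List Char) : ∀ (K : Nat) (l r : Int) (s : UState) (rest : List BFrame),
    (r - l).toNat ≤ K → s.ok = true → 0 ≤ l → r ≤ (s.a.length : Int) →
    s.b.length = s.a.length →
    runB logL (.call l r :: rest) s.cur s.a s.b =
      (if (msA logL l r s).ok = true then
        runB logL rest (msA logL l r s).cur (msA logL l r s).a (msA logL l r s).b
      else none) := by
  intro K
  induction K with
  | zero =>
    intro l r s rest hK hok h0 hr hb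
    rw [runB]
    dsimp only
    rw [if_neg (by omega : ¬ 1 < r - l), msA, if_pos (by omega : r - l ≤ 1), if_pos hok]
  | succ K ih =>
    intro l r s rest hK hok h0 hr hb
    by_cases hbase : r - l ≤ 1
    · rw [runB]
      dsimp only
      rw [if_neg (by omega : ¬ 1 < r - l), msA, if_pos hbase, if_pos hok]
    · have hm := pvMidBounds l r (by omega)
      rw [runB]
      dsimp only
      rw [if_pos (by omega : 1 < r - l)]
      rw [ih l (PySem.Int.floordiv (l + r) 2) s
        (.call (PySem.Int.floordiv (l + r) 2) r :: .merge l r (PySem.Int.floordiv (l + r) 2) :: rest)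
        (by omega) hok h0 (by omega) hb]
      have inv1 := msA_inv logL ((PySem.Int.floordiv (l + r) 2) - l).toNat
        l (PySem.Int.floordiv (l + r) 2) le_rfl s hok
      by_cases h1 : (msA logL l (PySem.Int.floordiv (l + r) 2) s).ok = true
      · rw [if_pos h1]
        rw [ih (PySem.Int.floordiv (l + r) 2) r (msA logL l (PySem.Int.floordiv (l + r) 2) s)
          (.merge l r (PySem.Int.floordiv (l + r) 2) :: rest)
          (by omega) h1 (by omega) (by omega) (by omega)]
        have inv2 := msA_inv logL (r - PySem.Int.floordiv (l + r) 2).toNat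
          (PySem.Int.floordiv (l + r) 2) r le_rfl _ h1
        by_cases h2 : (msA logL (PySem.Int.floordiv (l + r) 2) r
            (msA logL l (PySem.Int.floordiv (l + r) 2) s)).ok = true
        · rw [if_pos h2]
          rw [runB]
          have pe := phase_eq logL (PySem.Int.floordiv (l + r) 2) r (r - l).toNat
            l (PySem.Int.floordiv (l + r) 2) l
            (msA logL (PySem.Int.floordiv (l + r) 2) r (msA logL l (PySem.Int.floordiv (l + r) 2) s))
            (by omega) (by omega) (by omega) (by omega) h2
          rcases hmb : mergeB logL (PySem.Int.floordiv (l + r) 2) r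
              l (PySem.Int.floordiv (l + r) 2) l
              (msA logL (PySem.Int.floordiv (l + r) 2) r (msA logL l (PySem.Int.floordiv (l + r) 2) s)).cur
              (msA logL (PySem.Int.floordiv (l + r) 2) r (msA logL l (PySem.Int.floordiv (l + r) 2) s)).a
              (msA logL (PySem.Int.floordiv (l + r) 2) r (msA logL l (PySem.Int.floordiv (l + r) 2) s)).b
              with _ | ⟨cur', b'⟩ <;> rw [hmb] at pe <;> simp only at pe <;> dsimp only
          · have hmsa : msA logL l r s =
                (phaseH logL (PySem.Int.floordiv (l + r) 2) r l (PySem.Int.floordiv (l + r) 2) l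
                  (msA logL (PySem.Int.floordiv (l + r) 2) r
                    (msA logL l (PySem.Int.floordiv (l + r) 2) s))).1 := by
              rw [msA, if_neg hbase]
              dsimp only
              rw [mergeStepA_eq_phaseH, if_pos pe.1]
            rw [hmsa, if_neg (by rw [pe.2]; simp)]
          · have hmsa : msA logL l r s = copyA l r
                { msA logL (PySem.Int.floordiv (l + r) 2) r (msA logL l (PySem.Int.floordiv (l + r) 2) s)
                  with cur := cur', b := b' } := by
              rw [msA, if_neg hbase]
              dsimp only
              rw [mergeStepA_eq_phaseH, pe.1]
              simp
            have cf := copyA_fields l r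
              { msA logL (PySem.Int.floordiv (l + r) 2) r (msA logL l (PySem.Int.floordiv (l + r) 2) s)
                with cur := cur', b := b' }
            rw [hmsa, if_pos (cf.2.1.trans h2)]
            rw [cf.1, cf.2.2.1]
            have sp := copyA_splice (r - l).toNat l r
              { msA logL (PySem.Int.floordiv (l + r) 2) r (msA logL l (PySem.Int.floordiv (l + r) 2) s)
                with cur := cur', b := b' }
              le_rfl h0 (by omega) (by dsimp only; omega) (by dsimp only; omega)
            dsimp only at sp
            rw [sp]
        · have hmsa : msA logL l r s =
              msA logL (PySem.Int.floordiv (l + r) 2) r (msA logL l (PySem.Int.floordiv (l + r) 2) s) := by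
            rw [msA, if_neg hbase]
            dsimp only
            rw [mergeStepA_abort logL l (PySem.Int.floordiv (l + r) 2) r _
              ⟨hm.1, hm.2⟩ (inv2.2.2 (by simpa using h2)) (by simpa using h2)]
          rw [if_neg h2, hmsa, if_neg h2]
      · rw [if_neg h1]
        have hnoop := msA_noop logL (r - PySem.Int.floordiv (l + r) 2).toNat
          (PySem.Int.floordiv (l + r) 2) r le_rfl _ (inv1.2.2 (by simpa using h1)) (by simpa using h1)
        have hmsa : msA logL l r s = msA logL l (PySem.Int.floordiv (l + r) 2) s := by
          rw [msA, if_neg hbase]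
          dsimp only
          rw [hnoop]
          rw [mergeStepA_abort logL l (PySem.Int.floordiv (l + r) 2) r _
            ⟨hm.1, hm.2⟩ (inv1.2.2 (by simpa using h1)) (by simpa using h1)]
        rw [hmsa, if_neg h1]

-- ===== VERDICT (by name: the statement is the Claim_ definition above) =====
theorem unsort_spec : Claim_equal_unsort := by
  unfold Claim_equal_unsort Spec_unsort
  intro n log _
  unfold unsort unsort_alt
  dsimp only
  have ha0 : (PySem.List.pyRange 0 n 1).map (fun i => i + 1) = PySem.List.pyRange 1 (n + 1) 1 := by
    rw [PySem.List.pyRange_one, PySem.List.pyRange_one, List.map_map]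
    rw [show n + 1 - 1 = n - 0 by ring]
    exact List.map_congr_left (fun a _ => by simp [Function.comp]; omega)
  have hb0 : (PySem.List.pyRange 0 n 1).map (fun _ => (0 : Int)) = List.replicate n.toNat 0 := by
    rw [List.map_const', PySem.List.length_pyRange_one]
    norm_num
  have hlen : (PySem.List.pyRange 1 (n + 1) 1).length = n.toNat := by
    rw [PySem.List.length_pyRange_one]; omega
  rw [ha0, hb0]
  have hs := simL log.toList n.toNat 0 n
    ⟨0, true, PySem.List.pyRange 1 (n + 1) 1, List.replicate n.toNat 0⟩ []
    (by omega) rfl le_rfl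
    (by dsimp only; rw [hlen]; omega)
    (by dsimp only; rw [List.length_replicate, hlen])
  dsimp only at hs
  rw [hs]
  by_cases hok : (msA log.toList 0 n
      ⟨0, true, PySem.List.pyRange 1 (n + 1) 1, List.replicate n.toNat 0⟩).ok = true
  · rw [if_pos hok, runB]
    dsimp only
    by_cases hcur : (msA log.toList 0 n
        ⟨0, true, PySem.List.pyRange 1 (n + 1) 1, List.replicate n.toNat 0⟩).cur = log.toList.length
    · rw [if_pos ⟨hcur, hok⟩, if_pos hcur]
    · rw [if_neg (fun h => hcur h.1), if_neg hcur]
  · rw [if_neg hok, if_neg (fun h => hok h.2)]
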